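-- pv_equiv track=rewrite | github.com/myshyak5/LABS_DM | LAB_4/lab4.py | analyze_text_statistics
-- ===== SOURCE A (Python) =====
-- def analyze_text_statistics(text):
--     letter_stats = {}
--     for letter in text:
--         if letter in letter_stats:
--             letter_stats[letter] += 1
--         else:
--             letter_stats[letter] = 1
--
--     total_letters = len(text)
--     sorted_letters = dict(sorted(letter_stats.items()))
--
--     bigram_stats = {}
--     for i in range(len(text) - 1):
--         bigram = text[i] + text[i+1]
--         if bigram in bigram_stats:
--             bigram_stats[bigram] += 1
--         else:
--             bigram_stats[bigram] = 1
--
--     total_bigrams = len(text) - 1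
--     sorted_bigrams = dict(sorted(bigram_stats.items()))
--     return sorted_letters, sorted_bigrams, total_letters, total_bigrams
-- ===== SOURCE B (Python) =====
-- def analyze_text_statistics(text):
--     letters = {}
--     bigrams = {}
--     prev = None
--     for ch in text:
--         letters[ch] = letters.get(ch, 0) + 1
--         if prev is not None:
--             bg = prev + ch
--             bigrams[bg] = bigrams.get(bg, 0) + 1
--         prev = ch
--     return (dict(sorted(letters.items())), dict(sorted(bigrams.items())),
--             len(text), len(text) - 1)
-- ===== Notes on version B (the rewrite author's own statement) =====
-- stated objective: alternative
-- what changed: Replaces A's two separate scans (one over characters, one over index range(len-1) rebuilding each bigram by indexing) with a single pass that tracks the previous character and updates both counters at once via dict.get, keeping A's sorted-dict outputs and len(text)-1 bigram total.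
import Mathlib
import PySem

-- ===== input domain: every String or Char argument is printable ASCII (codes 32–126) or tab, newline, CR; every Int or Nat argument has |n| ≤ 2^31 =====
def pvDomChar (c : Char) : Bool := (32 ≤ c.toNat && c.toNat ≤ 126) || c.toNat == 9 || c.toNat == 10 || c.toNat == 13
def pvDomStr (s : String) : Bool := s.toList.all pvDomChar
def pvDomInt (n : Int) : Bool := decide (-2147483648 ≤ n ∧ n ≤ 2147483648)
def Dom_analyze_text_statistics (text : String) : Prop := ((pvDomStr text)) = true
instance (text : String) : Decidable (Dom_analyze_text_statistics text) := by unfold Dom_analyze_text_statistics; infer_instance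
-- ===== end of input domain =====

-- B fuses A's two scans into one previous-character pass; same outputs, similar cost (objective: alternative).

-- ===== PORT A =====
-- the `if key in dict: dict[key] += 1 else: dict[key] = 1` body shared by A's two loops
def pvACount (d : PySem.Dict String Int) (k : String) : PySem.Dict String Int :=
  if d.contains k then d.insert k (d.getD k 0 + 1) else d.insert k 1

def analyze_text_statistics (text : String) :
    (List (String × Int)) × (List (String × Int)) × Int × Int :=
  let l := text.toList
  -- for letter in text: … (each letter is a 1-character string)
  let letter_stats := l.foldl (fun d c => pvACount d (String.ofList [c])) PySem.Dict.empty
  let total_letters : Int := (PySem.Str.len text : Int)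
  let sorted_letters := PySem.List.sorted2 letter_stats.items (·.1) (·.2)
  -- for i in range(len(text) - 1): bigram = text[i] + text[i+1]; …
  -- (both indices are in range on every iteration of range(len(text)-1), so pyGet? is always `some`)
  let bigram_stats := (PySem.List.pyRange 0 ((PySem.Str.len text : Int) - 1)).foldl
      (fun d i =>
        match PySem.List.pyGet? l i, PySem.List.pyGet? l (i + 1) with
        | some a, some b => pvACount d (String.ofList [a, b])
        | _, _ => d) PySem.Dict.empty
  let total_bigrams : Int := (PySem.Str.len text : Int) - 1
  let sorted_bigrams := PySem.List.sorted2 bigram_stats.items (·.1) (·.2)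
  (sorted_letters, sorted_bigrams, total_letters, total_bigrams)

-- ===== PORT B =====
-- one loop step: state = (prev, letters, bigrams); counts the letter, and the bigram when prev exists
def pvBStep (st : Option Char × PySem.Dict String Int × PySem.Dict String Int) (c : Char) :
    Option Char × PySem.Dict String Int × PySem.Dict String Int :=
  let letters := st.2.1.insert (String.ofList [c]) (st.2.1.getD (String.ofList [c]) 0 + 1)
  let bigrams :=
    match st.1 with
    | none => st.2.2
    | some p => st.2.2.insert (String.ofList [p, c]) (st.2.2.getD (String.ofList [p, c]) 0 + 1)
  (some c, letters, bigrams)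

def analyze_text_statistics_alt (text : String) :
    (List (String × Int)) × (List (String × Int)) × Int × Int :=
  let st := text.toList.foldl pvBStep (none, PySem.Dict.empty, PySem.Dict.empty)
  (PySem.List.sorted2 st.2.1.items (·.1) (·.2),
   PySem.List.sorted2 st.2.2.items (·.1) (·.2),
   (PySem.Str.len text : Int),
   (PySem.Str.len text : Int) - 1)

-- ===== PRECONDITION & SPEC =====
def Spec_analyze_text_statistics (text : String) (out : (List (String × Int)) × (List (String × Int)) × Int × Int) : Prop := out = analyze_text_statistics_alt text
instance (text : String) (out : (List (String × Int)) × (List (String × Int)) × Int × Int) : Decidable (Spec_analyze_text_statistics text out) := by unfold Spec_analyze_text_statistics; infer_instance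

-- ===== CLAIM (what is proved, stated in full; the proofs are below) =====
def Claim_equal_analyze_text_statistics : Prop := ∀ (text : String), Dom_analyze_text_statistics text → Spec_analyze_text_statistics text (analyze_text_statistics text)

-- ===== LEMMAS AND PROOFS =====

-- A's two-branch counting step is the `get(k, 0) + 1` update
theorem pvACount_eq (d : PySem.Dict String Int) (k : String) :
    pvACount d k = d.insert k (d.getD k 0 + 1) := by
  unfold pvACount
  rcases h : d.contains k with _ | _
  · simp [PySem.Dict.getD_of_not_contains d 0 h]
  · simp

-- the letters component of B's fused fold is A's letter fold
theorem pvB_letters (l : List Char) (p : Option Char)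
    (d1 d2 : PySem.Dict String Int) :
    (l.foldl pvBStep (p, d1, d2)).2.1 =
      l.foldl (fun d c => d.insert (String.ofList [c]) (d.getD (String.ofList [c]) 0 + 1)) d1 := by
  induction l generalizing p d1 d2 with
  | nil => rfl
  | cons c t ih => simpa [pvBStep] using ih _ _ _

-- the bigrams component of B's fused fold, started with a previous character p
theorem pvB_bigrams_some (l : List Char) (p : Char) (d1 d2 : PySem.Dict String Int) :
    (l.foldl pvBStep (some p, d1, d2)).2.2 =
      ((p :: l).zip l).foldl
        (fun d q => d.insert (String.ofList [q.1, q.2]) (d.getD (String.ofList [q.1, q.2]) 0 + 1)) d2 := by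
  induction l generalizing p d1 d2 with
  | nil => rfl
  | cons c t ih => simpa [pvBStep] using ih _ _ _

-- the bigrams component of B's fused fold from the initial state
theorem pvB_bigrams (l : List Char) (d1 d2 : PySem.Dict String Int) :
    (l.foldl pvBStep (none, d1, d2)).2.2 =
      (l.zip l.tail).foldl
        (fun d q => d.insert (String.ofList [q.1, q.2]) (d.getD (String.ofList [q.1, q.2]) 0 + 1)) d2 := by
  cases l with
  | nil => rfl
  | cons c t => simpa [pvBStep] using pvB_bigrams_some t c _ _

-- A's index loop (as a Nat-range fold) is a fold over the adjacent pairs of the list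
theorem pvA_aux (g : PySem.Dict String Int → String → PySem.Dict String Int) :
    ∀ (l : List Char) (d : PySem.Dict String Int),
    (List.range (l.length - 1)).foldl
        (fun d k =>
          match l[k]?, l[k + 1]? with
          | some x, some y => g d (String.ofList [x, y])
          | _, _ => d) d =
      (l.zip l.tail).foldl (fun d q => g d (String.ofList [q.1, q.2])) d
  | [], d => rfl
  | [_], d => rfl
  | a :: b :: t, d => by
    have h1 : (a :: b :: t).length - 1 = t.length + 1 := by simp
    rw [h1, List.range_succ_eq_map, List.foldl_cons, List.foldl_map]
    have ih := pvA_aux g (b :: t)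
    have h2 : (b :: t).length - 1 = t.length := by simp
    rw [h2] at ih
    have hfun : (fun (d : PySem.Dict String Int) (k : Nat) =>
          match (a :: b :: t)[Nat.succ k]?, (a :: b :: t)[Nat.succ k + 1]? with
          | some x, some y => g d (String.ofList [x, y])
          | _, _ => d) =
        (fun (d : PySem.Dict String Int) (k : Nat) =>
          match (b :: t)[k]?, (b :: t)[k + 1]? with
          | some x, some y => g d (String.ofList [x, y])
          | _, _ => d) := by
      funext d k
      simp [Nat.succ_eq_add_one]
    rw [hfun]
    simpa using ih _
  termination_by l => l.length

-- Python's range(len(l)-1) as the cast of a Nat range (also for the empty list, where len-1 = -1)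
theorem pvRange_cast (l : List Char) :
    PySem.List.pyRange 0 ((l.length : Int) - 1) =
      (List.range (l.length - 1)).map (Nat.cast : Nat → Int) := by
  cases l with
  | nil => decide
  | cons a t =>
    have h : ((a :: t).length : Int) - 1 = ((t.length : Nat) : Int) := by simp
    rw [h, PySem.List.pyRange_zero_natCast]
    simp only [List.length_cons, Nat.add_sub_cancel]

-- ===== VERDICT (by name: the statement is the Claim_ definition above) =====
theorem analyze_text_statistics_spec : Claim_equal_analyze_text_statistics := by
  intro text _
  unfold Spec_analyze_text_statistics analyze_text_statistics analyze_text_statistics_alt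
  simp only []
  rw [pvB_letters, pvB_bigrams]
  have hlen : (PySem.Str.len text : Int) = (text.toList.length : Int) := by
    simp [PySem.Str.len_eq]
  rw [hlen, pvRange_cast, List.foldl_map]
  have hconv : (fun (d : PySem.Dict String Int) (k : Nat) =>
        match PySem.List.pyGet? text.toList ((k : Int)), PySem.List.pyGet? text.toList ((k : Int) + 1) with
        | some x, some y => pvACount d (String.ofList [x, y])
        | _, _ => d) =
      (fun (d : PySem.Dict String Int) (k : Nat) =>
        match text.toList[k]?, text.toList[k + 1]? with
        | some x, some y => pvACount d (String.ofList [x, y])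
        | _, _ => d) := by
    funext d k
    have e : ((k : Int) + 1) = ((k + 1 : Nat) : Int) := by push_cast; ring
    rw [e, PySem.List.pyGet?_natCast, PySem.List.pyGet?_natCast]
  rw [hconv, pvA_aux pvACount]
  have hf1 : (fun (d : PySem.Dict String Int) (c : Char) => pvACount d (String.ofList [c])) =
      (fun (d : PySem.Dict String Int) (c : Char) =>
        d.insert (String.ofList [c]) (d.getD (String.ofList [c]) 0 + 1)) := by
    funext d c; exact pvACount_eq d _
  have hf2 : (fun (d : PySem.Dict String Int) (q : Char × Char) => pvACount d (String.ofList [q.1, q.2])) =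
      (fun (d : PySem.Dict String Int) (q : Char × Char) =>
        d.insert (String.ofList [q.1, q.2]) (d.getD (String.ofList [q.1, q.2]) 0 + 1)) := by
    funext d q; exact pvACount_eq d _
  rw [hf1, hf2]
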